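-- pv_equiv track=rewrite | github.com/AdamZhouSE/pythonHomework | Code/CodeRecords/2530/60604/239172.py | isForm
-- ===== SOURCE A (Python) =====
-- def isForm(x,y,a):
--
--     x1=27
--     y1=27
--     for i in range(len(a)):
--         if x==a[i]:
--             x1=i
--         if y==a[i]:
--             y1=i
--     return x1<y1
-- ===== SOURCE B (Python) =====
-- def isForm(x, y, a):
--     def last_index(v):
--         for i, ai in reversed(list(enumerate(a))):
--             if v == ai:
--                 return i
--         return 27
--     return last_index(x) < last_index(y)
-- ===== Notes on version B (the rewrite author's own statement) =====
-- stated objective: alternative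
-- what changed: Replaces A's single interleaved forward pass recording every occurrence with two independent backward scans that stop at the first (i.e. last) occurrence, keeping the 27 default for absent values.
import Mathlib
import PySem

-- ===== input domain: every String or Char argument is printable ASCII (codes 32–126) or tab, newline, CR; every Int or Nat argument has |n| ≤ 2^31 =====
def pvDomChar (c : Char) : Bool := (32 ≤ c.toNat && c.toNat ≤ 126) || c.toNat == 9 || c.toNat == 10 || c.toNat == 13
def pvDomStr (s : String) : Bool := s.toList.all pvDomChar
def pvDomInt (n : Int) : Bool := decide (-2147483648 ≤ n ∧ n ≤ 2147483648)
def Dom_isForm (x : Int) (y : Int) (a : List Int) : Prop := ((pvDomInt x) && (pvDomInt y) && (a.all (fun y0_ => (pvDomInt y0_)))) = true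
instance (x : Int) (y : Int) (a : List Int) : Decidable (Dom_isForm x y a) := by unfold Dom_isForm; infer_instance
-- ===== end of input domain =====

-- B replaces A's single interleaved forward pass (recording every occurrence) with two
-- independent backward scans that stop at the first hit (objective: alternative, same cost).

-- ===== PORT A =====
-- one forward pass over i in range(len(a)), updating x1 and y1 together
def isForm (x : Int) (y : Int) (a : List Int) : Bool :=
  let p := (PySem.List.enumerate a).foldl
    (fun (s : Int × Int) ei =>
      (if x = ei.2 then ei.1 else s.1, if y = ei.2 then ei.1 else s.2)) (27, 27)
  decide (p.1 < p.2)

-- ===== PORT B =====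
-- backward scan with break: walk the (index, value) pairs in descending index order,
-- return the first index whose value matches, default d (= 27)
def pvFindBack (v : Int) (d : Int) : List (Int × Int) → Int
  | [] => d
  | ei :: rest => if v = ei.2 then ei.1 else pvFindBack v d rest

def isForm_alt (x : Int) (y : Int) (a : List Int) : Bool :=
  let rev := (PySem.List.enumerate a).reverse
  decide (pvFindBack x 27 rev < pvFindBack y 27 rev)

-- ===== PRECONDITION & SPEC =====
def Spec_isForm (x : Int) (y : Int) (a : List Int) (out : Bool) : Prop := out = isForm_alt x y a
instance (x : Int) (y : Int) (a : List Int) (out : Bool) : Decidable (Spec_isForm x y a out) := by unfold Spec_isForm; infer_instance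

-- ===== CLAIM (what is proved, stated in full; the proofs are below) =====
def Claim_equal_isForm : Prop := ∀ (x : Int) (y : Int) (a : List Int), Dom_isForm x y a → Spec_isForm x y a (isForm x y a)

-- ===== LEMMAS AND PROOFS =====

theorem pvFindBack_append (v d : Int) (m : List (Int × Int)) (ei : Int × Int) :
    pvFindBack v d (m ++ [ei]) = pvFindBack v (if v = ei.2 then ei.1 else d) m := by
  induction m with
  | nil => simp [pvFindBack]
  | cons e m ih => simp [pvFindBack, ih]

theorem foldl_eq_findBack (v d : Int) (l : List (Int × Int)) :
    l.foldl (fun (s : Int) ei => if v = ei.2 then ei.1 else s) d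
      = pvFindBack v d l.reverse := by
  induction l generalizing d with
  | nil => simp [pvFindBack]
  | cons e l ih => simp [List.foldl_cons, ih, pvFindBack_append]

theorem foldl_pair_fst (x y : Int) (l : List (Int × Int)) (c d : Int) :
    (l.foldl (fun (s : Int × Int) ei =>
        (if x = ei.2 then ei.1 else s.1, if y = ei.2 then ei.1 else s.2)) (c, d)).1
      = l.foldl (fun (s : Int) ei => if x = ei.2 then ei.1 else s) c := by
  induction l generalizing c d with
  | nil => rfl
  | cons e l ih => simp [List.foldl_cons, ih]

theorem foldl_pair_snd (x y : Int) (l : List (Int × Int)) (c d : Int) :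
    (l.foldl (fun (s : Int × Int) ei =>
        (if x = ei.2 then ei.1 else s.1, if y = ei.2 then ei.1 else s.2)) (c, d)).2
      = l.foldl (fun (s : Int) ei => if y = ei.2 then ei.1 else s) d := by
  induction l generalizing c d with
  | nil => rfl
  | cons e l ih => simp [List.foldl_cons, ih]

-- ===== VERDICT (by name: the statement is the Claim_ definition above) =====
theorem isForm_spec : Claim_equal_isForm := by
  intro x y a _
  unfold Spec_isForm isForm isForm_alt
  simp only [foldl_pair_fst, foldl_pair_snd, foldl_eq_findBack]
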